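-- pv_equiv track=rewrite | github.com/pypi-data/pypi-mirror-395 | packages/blindai-guard/blindai_guard-0.1.0.tar.gz/blindai_guard-0.1.0/src/blind_ai/core/detection/patterns/validators.py | validate_ein
-- ===== SOURCE A (Python) =====
-- def validate_ein(ein: str) -> bool:
--     """Validate US Employer Identification Number (EIN) format.
--
--     EIN format: XX-XXXXXXX (9 digits total)
--     First 2 digits (campus code) must be between 01-99 (excluding some ranges)
--
--     Args:
--         ein: Employer Identification Number
--
--     Returns:
--         True if format is valid, False otherwise
--
--     Example:
--         >>> validate_ein("12-3456789")
--         True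
--         >>> validate_ein("00-3456789")
--         False
--     """
--     # Remove non-digit characters
--     digits = "".join(c for c in ein if c.isdigit())
--
--     if len(digits) != 9:
--         return False
--
--     # Campus code (first 2 digits)
--     campus_code = int(digits[:2])
--
--     # Valid campus codes are 01-06, 10-16, 20-27, 30-39, 40-48,
--     # 50-59, 60-67, 71-77, 80-88, 90-99
--     valid_ranges = [
--         (1, 6),
--         (10, 16),
--         (20, 27),
--         (30, 39),
--         (40, 48),
--         (50, 59),
--         (60, 67),
--         (71, 77),
--         (80, 88),
--         (90, 99),
--     ]
--
--     for start, end in valid_ranges: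
--         if start <= campus_code <= end:
--             return True
--
--     return False
-- ===== SOURCE B (Python) =====
-- def validate_ein(ein: str) -> bool:
--     # Single pass: count digits and capture the first two as they stream by,
--     # then decide validity arithmetically from the tens/units decomposition of
--     # the campus code (per-tens-digit bounds), with no digit string, no
--     # slicing/int() and no range table.
--     n = 0
--     tens = 0
--     units = 0
--     for c in ein:
--         if c.isdigit():
--             if n == 0:
--                 tens = ord(c) - 48
--             elif n == 1:
--                 units = ord(c) - 48
--             n += 1
--     if n != 9:
--         return False
--     lo = 1 if tens == 0 or tens == 7 else 0
--     hi = (6, 6, 7, 9, 8, 9, 7, 7, 8, 9)[tens]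
--     return lo <= units <= hi
-- ===== Notes on version B (the rewrite author's own statement) =====
-- stated objective: alternative
-- what changed: A builds a digit string, checks its length, parses the first two characters with int() and scans a list of (start, end) range pairs; B makes one streaming pass over the input that counts digits and captures the first two as digit values, then decides validity arithmetically from the tens/units decomposition of the campus code (a lower bound of 1 only for tens digit 0 or 7, and a per-tens-digit upper bound on the units digit), with no digit string, no slicing/int() and no range table.
import Mathlib
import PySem

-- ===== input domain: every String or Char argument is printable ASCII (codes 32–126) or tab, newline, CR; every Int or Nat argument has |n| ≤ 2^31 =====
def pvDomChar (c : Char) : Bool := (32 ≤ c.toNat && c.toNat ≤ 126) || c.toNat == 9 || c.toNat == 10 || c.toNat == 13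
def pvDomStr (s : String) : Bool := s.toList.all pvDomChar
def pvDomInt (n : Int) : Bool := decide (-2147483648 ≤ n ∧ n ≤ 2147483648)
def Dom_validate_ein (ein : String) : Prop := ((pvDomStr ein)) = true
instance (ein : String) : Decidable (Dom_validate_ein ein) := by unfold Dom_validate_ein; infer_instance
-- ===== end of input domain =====

-- B replaces A's build-a-digit-string / slice / int() / range-table scan by ONE streaming pass
-- that counts digits and captures the first two, deciding validity arithmetically from the
-- tens/units decomposition of the campus code (objective: alternative).

-- ===== PORT A =====
-- A's literal list of valid ranges
def valid_ranges : List (Int × Int) :=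
  [(1, 6), (10, 16), (20, 27), (30, 39), (40, 48),
   (50, 59), (60, 67), (71, 77), (80, 88), (90, 99)]

-- A's 'for start, end in valid_ranges: if start <= campus_code <= end: return True' / 'return False'
def scanRanges (rs : List (Int × Int)) (campus_code : Int) : Bool :=
  match rs with
  | [] => false
  | (s, e) :: rest =>
      if s ≤ campus_code ∧ campus_code ≤ e then true else scanRanges rest campus_code

def validate_ein (ein : String) : Bool :=
  let digits := ein.toList.filter PySem.Chars.isdigit
  if digits.length ≠ 9 then false
  else
    -- int(digits[:2]); the slice consists of two digit characters, so int() cannot raise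
    -- and ofChars? is always 'some' here: .getD 0 is never the default.
    let campus_code := (PySem.Int.ofChars? (PySem.List.slice digits none (some 2))).getD 0
    scanRanges valid_ranges campus_code

-- ===== PORT B =====
-- the body of B's single 'for c in ein' loop: state (n, tens, units)
def einStep (st : Int × Int × Int) (c : Char) : Int × Int × Int :=
  if PySem.Chars.isdigit c then
    if st.1 = 0 then (st.1 + 1, (c.toNat : Int) - 48, st.2.2)
    else if st.1 = 1 then (st.1 + 1, st.2.1, (c.toNat : Int) - 48)
    else (st.1 + 1, st.2.1, st.2.2)
  else st

def validate_ein_alt (ein : String) : Bool :=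
  let st := ein.toList.foldl einStep (0, 0, 0)
  if st.1 ≠ 9 then false
  else
    let lo : Int := if st.2.1 = 0 ∨ st.2.1 = 7 then 1 else 0
    -- B's tuple lookup (6,6,7,9,8,9,7,7,8,9)[tens]: tens is a digit value here, in range
    let hi : Int := (PySem.List.pyGet? ([6, 6, 7, 9, 8, 9, 7, 7, 8, 9] : List Int) st.2.1).getD 0
    decide (lo ≤ st.2.2 ∧ st.2.2 ≤ hi)

-- ===== PRECONDITION & SPEC =====
def Spec_validate_ein (ein : String) (out : Bool) : Prop := out = validate_ein_alt ein
instance (ein : String) (out : Bool) : Decidable (Spec_validate_ein ein out) := by unfold Spec_validate_ein; infer_instance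

-- ===== CLAIM (what is proved, stated in full; the proofs are below) =====
def Claim_equal_validate_ein : Prop := ∀ (ein : String), Dom_validate_ein ein → Spec_validate_ein ein (validate_ein ein)

-- ===== LEMMAS AND PROOFS =====

-- a Python-digit character is one of '0'..'9'
theorem digit_mem (c : Char) (h : PySem.Chars.isdigit c = true) :
    c ∈ ['0', '1', '2', '3', '4', '5', '6', '7', '8', '9'] := by
  have e0 : ('0' : Char).val.toNat = 48 := rfl
  have e1 : ('1' : Char).val.toNat = 49 := rfl
  have e2 : ('2' : Char).val.toNat = 50 := rfl
  have e3 : ('3' : Char).val.toNat = 51 := rfl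
  have e4 : ('4' : Char).val.toNat = 52 := rfl
  have e5 : ('5' : Char).val.toNat = 53 := rfl
  have e6 : ('6' : Char).val.toNat = 54 := rfl
  have e7 : ('7' : Char).val.toNat = 55 := rfl
  have e8 : ('8' : Char).val.toNat = 56 := rfl
  have e9 : ('9' : Char).val.toNat = 57 := rfl
  simp only [PySem.Chars.isdigit, Bool.and_eq_true, decide_eq_true_eq, Char.le_def,
    UInt32.le_iff_toNat_le, e0, e9] at h
  simp only [List.mem_cons, List.not_mem_nil, or_false, Char.ext_iff, UInt32.ext_iff,
    e0, e1, e2, e3, e4, e5, e6, e7, e8, e9]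
  omega

-- once two digits have been seen, the loop only counts
theorem fold_ge2 (l : List Char) (n t u : Int) (hn : 2 ≤ n) :
    l.foldl einStep (n, t, u) = (n + (l.filter PySem.Chars.isdigit).length, t, u) := by
  induction l generalizing n with
  | nil => simp
  | cons c cs ih =>
      by_cases hc : PySem.Chars.isdigit c = true
      · simp only [List.foldl_cons, List.filter_cons, hc, if_pos, einStep]
        rw [if_neg (by omega), if_neg (by omega)]
        rw [ih (n + 1) (by omega)]
        simp; ring
      · simp only [List.foldl_cons, List.filter_cons, einStep, hc]
        simp only [Bool.false_eq_true, if_false]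
        exact ih n hn

-- after one digit has been seen, the loop records the next digit and then only counts
theorem fold_1 (l : List Char) (t u : Int) :
    l.foldl einStep (1, t, u) =
      match l.filter PySem.Chars.isdigit with
      | [] => (1, t, u)
      | d :: r => ((2 + r.length : Int), t, (d.toNat : Int) - 48) := by
  induction l generalizing u with
  | nil => simp
  | cons c cs ih =>
      by_cases hc : PySem.Chars.isdigit c = true
      · simp only [List.foldl_cons, List.filter_cons, hc, if_pos, einStep]
        rw [if_neg (by omega)]
        rw [show (1 : Int) + 1 = 2 from rfl]
        rw [fold_ge2 _ 2 t ((c.toNat : Int) - 48) (by omega)]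
      · simp only [List.foldl_cons, List.filter_cons, einStep, hc]
        simp only [Bool.false_eq_true, if_false]
        exact ih u

-- from the initial state the loop computes (digit count, first digit value, second digit value)
theorem fold_0 (l : List Char) :
    l.foldl einStep (0, 0, 0) =
      match l.filter PySem.Chars.isdigit with
      | [] => ((0 : Int), (0 : Int), (0 : Int))
      | [d] => (1, (d.toNat : Int) - 48, 0)
      | d1 :: d2 :: r => ((2 + r.length : Int), (d1.toNat : Int) - 48, (d2.toNat : Int) - 48) := by
  induction l with
  | nil => simp
  | cons c cs ih =>
      by_cases hc : PySem.Chars.isdigit c = true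
      · simp only [List.foldl_cons, List.filter_cons, hc, if_pos, einStep]
        rw [show (0 : Int) + 1 = 1 from rfl]
        rw [fold_1 cs ((c.toNat : Int) - 48) 0]
        cases h : cs.filter PySem.Chars.isdigit with
        | nil => simp
        | cons d r => simp
      · simp only [List.foldl_cons, List.filter_cons, einStep, hc]
        simp only [Bool.false_eq_true, if_false]
        exact ih

-- the two decision procedures agree on any campus code given by two digit characters
theorem decision_eq (c1 c2 : Char)
    (h1 : PySem.Chars.isdigit c1 = true) (h2 : PySem.Chars.isdigit c2 = true) :
    scanRanges valid_ranges ((PySem.Int.ofChars? [c1, c2]).getD 0) =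
      (decide ((if ((c1.toNat : Int) - 48) = 0 ∨ ((c1.toNat : Int) - 48) = 7 then (1 : Int) else 0) ≤ (c2.toNat : Int) - 48 ∧
        (c2.toNat : Int) - 48 ≤ (PySem.List.pyGet? ([6, 6, 7, 9, 8, 9, 7, 7, 8, 9] : List Int) ((c1.toNat : Int) - 48)).getD 0)) := by
  have m1 := digit_mem c1 h1
  have m2 := digit_mem c2 h2
  fin_cases m1 <;> fin_cases m2 <;> decide

-- ===== VERDICT (by name: the statement is the Claim_ definition above) =====
theorem validate_ein_spec : Claim_equal_validate_ein := by
  intro ein _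
  unfold Spec_validate_ein validate_ein validate_ein_alt
  rw [fold_0]
  cases h : ein.toList.filter PySem.Chars.isdigit with
  | nil => simp
  | cons d1 rest =>
    cases rest with
    | nil => simp
    | cons d2 r =>
      by_cases hlen : (d1 :: d2 :: r).length = 9
      · have hr : r.length = 7 := by simpa using hlen
        rw [if_neg (by simp [hlen]), if_neg (by simp [hr])]
        have hslice : PySem.List.slice (d1 :: d2 :: r) none (some 2) = [d1, d2] := by
          simp [pysem]
        rw [hslice]
        have hd1 : PySem.Chars.isdigit d1 = true :=
          (List.mem_filter.mp (h ▸ List.mem_cons_self)).2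
        have hd2 : PySem.Chars.isdigit d2 = true :=
          (List.mem_filter.mp (h ▸ List.mem_cons_of_mem _ List.mem_cons_self)).2
        exact decision_eq d1 d2 hd1 hd2
      · have hr : r.length ≠ 7 := by simp only [List.length_cons] at hlen; omega
        rw [if_pos hlen, if_pos (by simp; omega)]
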